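-- pv_equiv track=rewrite | github.com/Alcatrao/FP | aula07/aula7_ex4_old.py | all_stats
-- ===== SOURCE A (Python) =====
-- def all_stats(scorelines):
--     stats = {}
--     for match in scorelines.keys():
--
--         if match[0] not in stats:
--             stats[match[0]] = [0,0,0,0,0,0]
--         if match[1] not in stats:
--             stats[match[1]] = [0,0,0,0,0,0]
--
--
--         n1, n2 = scorelines[match]
--
--         stats[match[0]][3]+=n1
--         stats[match[0]][4]+=n2
--
--         stats[match[1]][3]+=n2
--         stats[match[1]][4]+=n1
--
--         if n1>n2:
--             stats[match[0]][0]+=1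
--             stats[match[0]][5]+=3
--
--             stats[match[1]][2]+=1
--
--         if n1<n2:
--             stats[match[0]][2]+=1
--
--             stats[match[1]][5]+=3
--             stats[match[1]][0]+=1
--
--         if n1==n2:
--             stats[match[0]][1]+=1
--             stats[match[0]][5]+=1
--
--             stats[match[1]][1]+=1
--             stats[match[1]][5]+=1
--
--     return stats
-- ===== SOURCE B (Python) =====
-- def all_stats(scorelines):
--     # Stage 1: collect the teams in first-appearance order.
--     teams = []
--     for match in scorelines:
--         for t in match:
--             if t not in teams:
--                 teams.append(t)
--     # Stage 2: compute each team's row by an independent scan over all matches;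
--     # points are derived as 3*wins + draws instead of being accumulated.
--     result = {}
--     for t in teams:
--         w = d = l = gf = ga = 0
--         for (t1, t2), (n1, n2) in scorelines.items():
--             for team, f, g in ((t1, n1, n2), (t2, n2, n1)):
--                 if team == t:
--                     gf += f
--                     ga += g
--                     if f > g:
--                         w += 1
--                     elif f < g:
--                         l += 1
--                     else:
--                         d += 1
--         result[t] = [w, d, l, gf, ga, 3 * w + d]
--     return result
-- ===== Notes on version B (the rewrite author's own statement) =====
-- stated objective: alternative
-- what changed: A builds the stats in one pass by mutating six counters per team in a dict; B is a staged group-by: it first collects the teams in first-appearance order, then computes each team's row by an independent scan over all matches, deriving points as 3*wins+draws instead of accumulating them.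
import Mathlib
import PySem

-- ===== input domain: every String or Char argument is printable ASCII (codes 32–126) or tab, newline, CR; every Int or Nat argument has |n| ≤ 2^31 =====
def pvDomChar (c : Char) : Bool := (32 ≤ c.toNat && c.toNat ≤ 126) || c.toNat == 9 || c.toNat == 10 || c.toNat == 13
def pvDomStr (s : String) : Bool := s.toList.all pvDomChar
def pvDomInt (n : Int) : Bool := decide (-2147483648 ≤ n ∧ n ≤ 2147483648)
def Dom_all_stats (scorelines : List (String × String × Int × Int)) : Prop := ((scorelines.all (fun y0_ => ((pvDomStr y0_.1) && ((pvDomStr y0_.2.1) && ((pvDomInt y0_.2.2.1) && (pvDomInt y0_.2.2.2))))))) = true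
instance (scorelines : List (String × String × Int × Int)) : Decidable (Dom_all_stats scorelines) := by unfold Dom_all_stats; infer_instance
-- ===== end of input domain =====

-- ===== PORT A =====
-- B replaces A's single-pass dict mutation by a staged group-by: collect the teams first,
-- then compute each team's row by an independent scan over all matches (objective: alternative).
-- NOTE: A iterates `scorelines.keys()` and looks each key up; on a dict (unique keys) that is exactly
-- iteration over the dict's items, which is how the association-list argument is traversed here.
-- `row[i] += x` on the always-in-range 6-slot rows:
def pvBump (l : List Int) (i : Nat) (x : Int) : List Int := l.set i (l.getD i 0 + x)

def all_stats (scorelines : List (String × String × Int × Int)) : List (String × List Int) :=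
  (scorelines.foldl (fun stats m =>
    let stats := if stats.contains m.1 then stats else stats.insert m.1 [0, 0, 0, 0, 0, 0]
    let stats := if stats.contains m.2.1 then stats else stats.insert m.2.1 [0, 0, 0, 0, 0, 0]
    let n1 := m.2.2.1
    let n2 := m.2.2.2
    let stats := stats.modify m.1 [] (fun l => pvBump l 3 n1)
    let stats := stats.modify m.1 [] (fun l => pvBump l 4 n2)
    let stats := stats.modify m.2.1 [] (fun l => pvBump l 3 n2)
    let stats := stats.modify m.2.1 [] (fun l => pvBump l 4 n1)
    let stats := if n2 < n1 then
        let stats := stats.modify m.1 [] (fun l => pvBump l 0 1)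
        let stats := stats.modify m.1 [] (fun l => pvBump l 5 3)
        stats.modify m.2.1 [] (fun l => pvBump l 2 1)
      else stats
    let stats := if n1 < n2 then
        let stats := stats.modify m.1 [] (fun l => pvBump l 2 1)
        let stats := stats.modify m.2.1 [] (fun l => pvBump l 5 3)
        stats.modify m.2.1 [] (fun l => pvBump l 0 1)
      else stats
    let stats := if n1 = n2 then
        let stats := stats.modify m.1 [] (fun l => pvBump l 1 1)
        let stats := stats.modify m.1 [] (fun l => pvBump l 5 1)
        let stats := stats.modify m.2.1 [] (fun l => pvBump l 1 1)
        stats.modify m.2.1 [] (fun l => pvBump l 5 1)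
      else stats
    stats) PySem.Dict.empty).items

-- ===== PORT B =====
-- the body of Source B's innermost `if team == t:` block, over the accumulator (w, d, l, gf, ga):
def pvTally (t : String) (acc : Int × Int × Int × Int × Int) (team : String) (f g : Int) :
    Int × Int × Int × Int × Int :=
  if team = t then
    (if g < f then acc.1 + 1 else acc.1,
     if f = g then acc.2.1 + 1 else acc.2.1,
     if f < g then acc.2.2.1 + 1 else acc.2.2.1,
     acc.2.2.2.1 + f,
     acc.2.2.2.2 + g)
  else acc

def all_stats_alt (scorelines : List (String × String × Int × Int)) : List (String × List Int) :=
  -- stage 1: teams in first-appearance order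
  let teams := scorelines.foldl (fun ts m =>
    let ts := if ts.contains m.1 then ts else ts ++ [m.1]
    if ts.contains m.2.1 then ts else ts ++ [m.2.1]) []
  -- stage 2: one row per team by an independent scan of all matches (fresh keys in order = append)
  teams.map (fun t =>
    let a := scorelines.foldl (fun acc m =>
      pvTally t (pvTally t acc m.1 m.2.2.1 m.2.2.2) m.2.1 m.2.2.2 m.2.2.1)
      ((0 : Int), (0 : Int), (0 : Int), (0 : Int), (0 : Int))
    (t, [a.1, a.2.1, a.2.2.1, a.2.2.2.1, a.2.2.2.2, 3 * a.1 + a.2.1]))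

-- ===== PRECONDITION & SPEC =====
def Spec_all_stats (scorelines : List (String × String × Int × Int)) (out : List (String × List Int)) : Prop := out = all_stats_alt scorelines
instance (scorelines : List (String × String × Int × Int)) (out : List (String × List Int)) : Decidable (Spec_all_stats scorelines out) := by unfold Spec_all_stats; infer_instance

-- ===== CLAIM (what is proved, stated in full; the proofs are below) =====
def Claim_equal_all_stats : Prop := ∀ (scorelines : List (String × String × Int × Int)), Dom_all_stats scorelines → Spec_all_stats scorelines (all_stats scorelines)

-- ===== LEMMAS AND PROOFS =====

-- proof-only abbreviations for the two folds' step functions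
def aStep (stats : PySem.Dict String (List Int)) (m : String × String × Int × Int) :
    PySem.Dict String (List Int) :=
    let stats := if stats.contains m.1 then stats else stats.insert m.1 [0, 0, 0, 0, 0, 0]
    let stats := if stats.contains m.2.1 then stats else stats.insert m.2.1 [0, 0, 0, 0, 0, 0]
    let n1 := m.2.2.1
    let n2 := m.2.2.2
    let stats := stats.modify m.1 [] (fun l => pvBump l 3 n1)
    let stats := stats.modify m.1 [] (fun l => pvBump l 4 n2)
    let stats := stats.modify m.2.1 [] (fun l => pvBump l 3 n2)
    let stats := stats.modify m.2.1 [] (fun l => pvBump l 4 n1)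
    let stats := if n2 < n1 then
        let stats := stats.modify m.1 [] (fun l => pvBump l 0 1)
        let stats := stats.modify m.1 [] (fun l => pvBump l 5 3)
        stats.modify m.2.1 [] (fun l => pvBump l 2 1)
      else stats
    let stats := if n1 < n2 then
        let stats := stats.modify m.1 [] (fun l => pvBump l 2 1)
        let stats := stats.modify m.2.1 [] (fun l => pvBump l 5 3)
        stats.modify m.2.1 [] (fun l => pvBump l 0 1)
      else stats
    let stats := if n1 = n2 then
        let stats := stats.modify m.1 [] (fun l => pvBump l 1 1)
        let stats := stats.modify m.1 [] (fun l => pvBump l 5 1)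
        let stats := stats.modify m.2.1 [] (fun l => pvBump l 1 1)
        stats.modify m.2.1 [] (fun l => pvBump l 5 1)
      else stats
    stats

def teamStep (ts : List String) (m : String × String × Int × Int) : List String :=
  let ts := if ts.contains m.1 then ts else ts ++ [m.1]
  if ts.contains m.2.1 then ts else ts ++ [m.2.1]

def tallyStep (t : String) (acc : Int × Int × Int × Int × Int) (m : String × String × Int × Int) :
    Int × Int × Int × Int × Int :=
  pvTally t (pvTally t acc m.1 m.2.2.1 m.2.2.2) m.2.1 m.2.2.2 m.2.2.1

def toRow (a : Int × Int × Int × Int × Int) : List Int :=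
  [a.1, a.2.1, a.2.2.1, a.2.2.2.1, a.2.2.2.2, 3 * a.1 + a.2.1]

theorem all_stats_eq (sc : List (String × String × Int × Int)) :
    all_stats sc = (sc.foldl aStep PySem.Dict.empty).items := rfl

theorem all_stats_alt_eq (sc : List (String × String × Int × Int)) :
    all_stats_alt sc = (sc.foldl teamStep []).map
      (fun t => (t, toRow (sc.foldl (tallyStep t) (0, 0, 0, 0, 0)))) := rfl

-- the A-side per-match step as two mirrored whole-row updates (as in the previous machinery)
def pvUpdRow (gf ga : Int) (l : List Int) : List Int :=
  let l := pvBump (pvBump l 3 gf) 4 ga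
  if ga < gf then pvBump (pvBump l 0 1) 5 3
  else if gf < ga then pvBump l 2 1
  else pvBump (pvBump l 1 1) 5 1

def pvUpdate (stats : PySem.Dict String (List Int)) (team : String) (gf ga : Int) :
    PySem.Dict String (List Int) :=
  (stats.setdefault team [0, 0, 0, 0, 0, 0]).modify team [] (pvUpdRow gf ga)

theorem pvBump_comm (l : List Int) (i j : Nat) (x y : Int) (h : i ≠ j) :
    pvBump (pvBump l i x) j y = pvBump (pvBump l j y) i x := by
  unfold pvBump
  simp only [List.getD_eq_getElem?_getD, List.getElem?_set_ne h, List.getElem?_set_ne (Ne.symm h)]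
  exact List.set_comm _ _ h

theorem dict_contains_setdefault (d : PySem.Dict String (List Int)) (k k' : String) (v : List Int) :
    (d.setdefault k v).contains k' = (k' == k || d.contains k') := by
  by_cases h : d.contains k = true
  · rw [PySem.Dict.setdefault_of_contains d v h]
    by_cases hk : k' = k
    · subst hk; simp [h]
    · simp [hk]
  · rw [PySem.Dict.setdefault_of_not_contains d v (by simpa using h)]
    exact PySem.Dict.contains_insert d k k' v

theorem dict_setdefault_setdefault_self (d : PySem.Dict String (List Int)) (k : String) (v w : List Int) :
    (d.setdefault k v).setdefault k w = d.setdefault k v := by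
  apply PySem.Dict.setdefault_of_contains
  rw [dict_contains_setdefault]; simp

theorem dict_modify_setdefault_self (d : PySem.Dict String (List Int)) (k : String)
    (z v : List Int) (f : List Int → List Int) :
    (d.modify k z f).setdefault k v = d.modify k z f := by
  apply PySem.Dict.setdefault_of_contains
  rw [PySem.Dict.contains_modify]; simp

theorem dict_if_contains_eq_setdefault (d : PySem.Dict String (List Int)) (k : String) (v : List Int) :
    (if d.contains k then d else d.insert k v) = d.setdefault k v := by
  by_cases h : d.contains k = true
  · rw [if_pos h, PySem.Dict.setdefault_of_contains d v h]
  · rw [if_neg h, PySem.Dict.setdefault_of_not_contains d v (by simpa using h)]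

theorem dict_modify_modify (d : PySem.Dict String (List Int)) (k : String)
    (z z' : List Int) (f g : List Int → List Int) :
    (d.modify k z f).modify k z' g = d.modify k z (fun v => g (f v)) := by
  simp only [PySem.Dict.modify, PySem.Dict.getD_insert_self, PySem.Dict.insert_insert_self]

theorem dict_insert_comm_pp (d : PySem.Dict String (List Int)) (k k' : String) (v v' : List Int)
    (hne : k ≠ k') (h1 : d.contains k = true) (h2 : d.contains k' = true) :
    (d.insert k v).insert k' v' = (d.insert k' v').insert k v := by
  apply PySem.Dict.ext
  rw [PySem.Dict.items_insert_of_contains _ v' (by simp [PySem.Dict.contains_insert, h2]),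
    PySem.Dict.items_insert_of_contains _ v h1,
    PySem.Dict.items_insert_of_contains _ v (by simp [PySem.Dict.contains_insert, h1]),
    PySem.Dict.items_insert_of_contains _ v' h2, List.map_map, List.map_map]
  apply List.map_congr_left
  intro p _
  by_cases hpk : p.1 = k
  · simp [hpk, hne]
  · by_cases hpk' : p.1 = k'
    · simp [hpk', Ne.symm hne]
    · simp [hpk, hpk']

theorem dict_insert_comm_pa (d : PySem.Dict String (List Int)) (k k' : String) (v v' : List Int)
    (hne : k ≠ k') (h1 : d.contains k = true) (h2 : d.contains k' = false) :
    (d.insert k v).insert k' v' = (d.insert k' v').insert k v := by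
  apply PySem.Dict.ext
  rw [PySem.Dict.items_insert_of_not_contains _ v'
      (by simp [PySem.Dict.contains_insert, h2, Ne.symm hne]),
    PySem.Dict.items_insert_of_contains _ v h1,
    PySem.Dict.items_insert_of_contains _ v (by simp [PySem.Dict.contains_insert, h1]),
    PySem.Dict.items_insert_of_not_contains _ v' h2, List.map_append]
  simp [Ne.symm hne]

theorem dict_modify_comm (d : PySem.Dict String (List Int)) (k k' : String)
    (z z' : List Int) (f g : List Int → List Int)
    (hne : k ≠ k') (h1 : d.contains k = true) (h2 : d.contains k' = true) :
    (d.modify k z f).modify k' z' g = (d.modify k' z' g).modify k z f := by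
  simp only [PySem.Dict.modify]
  rw [PySem.Dict.getD_insert_of_ne _ _ _ (Ne.symm hne), PySem.Dict.getD_insert_of_ne _ _ _ hne]
  exact dict_insert_comm_pp d k k' _ _ hne h1 h2

theorem dict_modify_setdefault_comm (d : PySem.Dict String (List Int)) (k k' : String)
    (z v : List Int) (f : List Int → List Int)
    (hne : k ≠ k') (h1 : d.contains k = true) :
    (d.modify k z f).setdefault k' v = (d.setdefault k' v).modify k z f := by
  by_cases h2 : d.contains k' = true
  · rw [PySem.Dict.setdefault_of_contains _ v (by simp [PySem.Dict.contains_modify, h2]),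
      PySem.Dict.setdefault_of_contains _ v h2]
  · rw [PySem.Dict.setdefault_of_not_contains _ v
        (by simp [PySem.Dict.contains_modify, Ne.symm hne]; simpa using h2),
      PySem.Dict.setdefault_of_not_contains _ v (by simpa using h2)]
    simp only [PySem.Dict.modify]
    rw [PySem.Dict.getD_insert_of_ne _ _ _ hne]
    exact dict_insert_comm_pa d k k' _ _ hne h1 (by simpa using h2)

theorem dict_swap_block (d : PySem.Dict String (List Int)) (k k' : String) (z : List Int)
    (f g1 g2 : List Int → List Int)
    (hne : k ≠ k') (h1 : d.contains k = true) (h2 : d.contains k' = true) :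
    ((d.modify k' z g1).modify k' z g2).modify k z f
      = ((d.modify k z f).modify k' z g1).modify k' z g2 := by
  rw [dict_modify_comm _ k' k z z g2 f (Ne.symm hne)
      (by simp [PySem.Dict.contains_modify]) (by simp [PySem.Dict.contains_modify, h1]),
    dict_modify_comm _ k' k z z g1 f (Ne.symm hne) h2 h1]

theorem step_eq (s : PySem.Dict String (List Int)) (m : String × String × Int × Int) :
    aStep s m = pvUpdate (pvUpdate s m.1 m.2.2.1 m.2.2.2) m.2.1 m.2.2.2 m.2.2.1 := by
  obtain ⟨t1, t2, n1, n2⟩ := m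
  show (let s0 := if s.contains t1 then s else s.insert t1 [0, 0, 0, 0, 0, 0]
     let s0 := if s0.contains t2 then s0 else s0.insert t2 [0, 0, 0, 0, 0, 0]
     let s0 := s0.modify t1 [] (fun l => pvBump l 3 n1)
     let s0 := s0.modify t1 [] (fun l => pvBump l 4 n2)
     let s0 := s0.modify t2 [] (fun l => pvBump l 3 n2)
     let s0 := s0.modify t2 [] (fun l => pvBump l 4 n1)
     let s0 := if n2 < n1 then
         let s0 := s0.modify t1 [] (fun l => pvBump l 0 1)
         let s0 := s0.modify t1 [] (fun l => pvBump l 5 3)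
         s0.modify t2 [] (fun l => pvBump l 2 1)
       else s0
     let s0 := if n1 < n2 then
         let s0 := s0.modify t1 [] (fun l => pvBump l 2 1)
         let s0 := s0.modify t2 [] (fun l => pvBump l 5 3)
         s0.modify t2 [] (fun l => pvBump l 0 1)
       else s0
     let s0 := if n1 = n2 then
         let s0 := s0.modify t1 [] (fun l => pvBump l 1 1)
         let s0 := s0.modify t1 [] (fun l => pvBump l 5 1)
         let s0 := s0.modify t2 [] (fun l => pvBump l 1 1)
         s0.modify t2 [] (fun l => pvBump l 5 1)
       else s0
     s0) = pvUpdate (pvUpdate s t1 n1 n2) t2 n2 n1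
  rcases lt_trichotomy n1 n2 with h|h|h
  · -- n1 < n2
    simp only [dict_if_contains_eq_setdefault, if_neg (show ¬ n2 < n1 by omega), if_pos h,
      if_neg (show ¬ n1 = n2 by omega)]
    unfold pvUpdate
    by_cases ht : t1 = t2
    · subst ht
      rw [dict_setdefault_setdefault_self, dict_modify_setdefault_self]
      simp only [dict_modify_modify]
      congr 1
      funext l
      simp only [pvUpdRow]
      rw [if_neg (show ¬ n2 < n1 by omega), if_pos (show n1 < n2 from h),
        if_pos (show n1 < n2 from h)]
      generalize pvBump (pvBump l 3 n1) 4 n2 = Y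
      rw [pvBump_comm Y 2 3 1 n2 (by decide),
        pvBump_comm (pvBump Y 3 n2) 2 4 1 n1 (by decide),
        pvBump_comm (pvBump (pvBump (pvBump Y 3 n2) 4 n1) 2 1) 5 0 3 1 (by decide)]
    · rw [dict_modify_setdefault_comm _ t1 t2 _ _ _ ht (by simp [dict_contains_setdefault])]
      rw [dict_swap_block _ t1 t2 _ _ _ _ ht
        (by simp [PySem.Dict.contains_modify, dict_contains_setdefault])
        (by simp [PySem.Dict.contains_modify, dict_contains_setdefault])]
      simp only [dict_modify_modify]
      have hrow1 : (fun v => pvBump (pvBump (pvBump v 3 n1) 4 n2) 2 1) = pvUpdRow n1 n2 := by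
        funext l
        simp only [pvUpdRow]
        rw [if_neg (show ¬ n2 < n1 by omega), if_pos h]
      have hrow2 : (fun v => pvBump (pvBump (pvBump (pvBump v 3 n2) 4 n1) 5 3) 0 1)
          = pvUpdRow n2 n1 := by
        funext l
        simp only [pvUpdRow]
        rw [if_pos (show n1 < n2 from h)]
        exact pvBump_comm _ 5 0 3 1 (by decide)
      rw [hrow1, hrow2]
  · -- n1 = n2
    simp only [dict_if_contains_eq_setdefault, if_neg (show ¬ n2 < n1 by omega),
      if_neg (show ¬ n1 < n2 by omega), if_pos h]
    unfold pvUpdate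
    by_cases ht : t1 = t2
    · subst ht
      rw [dict_setdefault_setdefault_self, dict_modify_setdefault_self]
      simp only [dict_modify_modify]
      congr 1
      funext l
      simp only [pvUpdRow]
      rw [if_neg (show ¬ n2 < n1 by omega), if_neg (show ¬ n1 < n2 by omega),
        if_neg (show ¬ n1 < n2 by omega), if_neg (show ¬ n2 < n1 by omega)]
      generalize pvBump (pvBump l 3 n1) 4 n2 = Y
      rw [pvBump_comm (pvBump Y 1 1) 5 3 1 n2 (by decide),
        pvBump_comm (pvBump (pvBump Y 1 1) 3 n2) 5 4 1 n1 (by decide),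
        pvBump_comm Y 1 3 1 n2 (by decide),
        pvBump_comm (pvBump Y 3 n2) 1 4 1 n1 (by decide)]
    · rw [dict_modify_setdefault_comm _ t1 t2 _ _ _ ht (by simp [dict_contains_setdefault])]
      rw [dict_swap_block _ t1 t2 _ _ _ _ ht (by simp [PySem.Dict.contains_modify, dict_contains_setdefault]) (by simp [PySem.Dict.contains_modify, dict_contains_setdefault])]
      rw [dict_swap_block _ t1 t2 _ _ _ _ ht (by simp [PySem.Dict.contains_modify, dict_contains_setdefault]) (by simp [PySem.Dict.contains_modify, dict_contains_setdefault])]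
      simp only [dict_modify_modify]
      have hrow1 : (fun v => pvBump (pvBump (pvBump (pvBump v 3 n1) 4 n2) 1 1) 5 1)
          = pvUpdRow n1 n2 := by
        funext l
        simp only [pvUpdRow]
        rw [if_neg (show ¬ n2 < n1 by omega), if_neg (show ¬ n1 < n2 by omega)]
      have hrow2 : (fun v => pvBump (pvBump (pvBump (pvBump v 3 n2) 4 n1) 1 1) 5 1)
          = pvUpdRow n2 n1 := by
        funext l
        simp only [pvUpdRow]
        rw [if_neg (show ¬ n1 < n2 by omega), if_neg (show ¬ n2 < n1 by omega)]
      rw [hrow1, hrow2]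
  · -- n2 < n1
    simp only [dict_if_contains_eq_setdefault, if_pos h, if_neg (show ¬ n1 < n2 by omega),
      if_neg (show ¬ n1 = n2 by omega)]
    unfold pvUpdate
    by_cases ht : t1 = t2
    · subst ht
      rw [dict_setdefault_setdefault_self, dict_modify_setdefault_self]
      simp only [dict_modify_modify]
      congr 1
      funext l
      simp only [pvUpdRow]
      rw [if_pos (show n2 < n1 from h), if_neg (show ¬ n1 < n2 by omega),
        if_pos (show n2 < n1 from h)]
      generalize pvBump (pvBump l 3 n1) 4 n2 = Y
      rw [pvBump_comm (pvBump Y 0 1) 5 3 3 n2 (by decide),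
        pvBump_comm (pvBump (pvBump Y 0 1) 3 n2) 5 4 3 n1 (by decide),
        pvBump_comm Y 0 3 1 n2 (by decide),
        pvBump_comm (pvBump Y 3 n2) 0 4 1 n1 (by decide)]
    · rw [dict_modify_setdefault_comm _ t1 t2 _ _ _ ht (by simp [dict_contains_setdefault])]
      rw [dict_swap_block _ t1 t2 _ _ _ _ ht (by simp [PySem.Dict.contains_modify, dict_contains_setdefault]) (by simp [PySem.Dict.contains_modify, dict_contains_setdefault])]
      rw [dict_swap_block _ t1 t2 _ _ _ _ ht (by simp [PySem.Dict.contains_modify, dict_contains_setdefault]) (by simp [PySem.Dict.contains_modify, dict_contains_setdefault])]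
      simp only [dict_modify_modify]
      have hrow1 : (fun v => pvBump (pvBump (pvBump (pvBump v 3 n1) 4 n2) 0 1) 5 3)
          = pvUpdRow n1 n2 := by
        funext l
        simp only [pvUpdRow]
        rw [if_pos (show n2 < n1 from h)]
      have hrow2 : (fun v => pvBump (pvBump (pvBump v 3 n2) 4 n1) 2 1)
          = pvUpdRow n2 n1 := by
        funext l
        simp only [pvUpdRow]
        rw [if_neg (show ¬ n1 < n2 by omega), if_pos (show n2 < n1 from h)]
      rw [hrow1, hrow2]

-- pvUpdRow on a row of the shape toRow acc is exactly one firing pvTally step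
theorem pvUpdRow_toRow (t : String) (f g : Int) (acc : Int × Int × Int × Int × Int) :
    pvUpdRow f g (toRow acc) = toRow (pvTally t acc t f g) := by
  obtain ⟨w, d, l, gf, ga⟩ := acc
  simp only [pvUpdRow, pvTally, toRow, pvBump]
  rcases lt_trichotomy f g with h|h|h
  · simp [List.set, List.getD, h, show ¬ g < f by omega, show f ≠ g by omega]
  · simp [List.set, List.getD, h]
    ring
  · simp [List.set, List.getD, h, show ¬ f < g by omega, show f ≠ g by omega]
    ring

theorem pvTally_of_ne (t : String) (acc : Int × Int × Int × Int × Int) (team : String)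
    (f g : Int) (h : team ≠ t) : pvTally t acc team f g = acc := by
  simp [pvTally, h]

theorem pvUpdate_getD (d : PySem.Dict String (List Int)) (team : String) (f g : Int) (t : String) :
    (pvUpdate d team f g).getD t []
      = if t = team then
          pvUpdRow f g (if d.contains team then d.getD team [] else [0, 0, 0, 0, 0, 0])
        else d.getD t [] := by
  unfold pvUpdate
  by_cases hc : d.contains team = true
  · rw [PySem.Dict.setdefault_of_contains _ _ hc, PySem.Dict.getD_modify, if_pos hc]
  · rw [PySem.Dict.setdefault_of_not_contains _ _ (by simpa using hc),
      PySem.Dict.getD_modify, if_neg hc, PySem.Dict.getD_insert_self]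
    by_cases ht : t = team
    · rw [if_pos ht, if_pos ht]
    · rw [if_neg ht, if_neg ht, PySem.Dict.getD_insert_of_ne _ _ _ ht]

theorem pvUpdate_keys (d : PySem.Dict String (List Int)) (team : String) (f g : Int) :
    (pvUpdate d team f g).keys = if d.contains team then d.keys else d.keys ++ [team] := by
  unfold pvUpdate
  by_cases hc : d.contains team = true
  · rw [PySem.Dict.setdefault_of_contains _ _ hc, if_pos hc, PySem.Dict.keys_modify,
      PySem.Dict.keys_insert_of_contains _ _ hc]
  · rw [PySem.Dict.setdefault_of_not_contains _ _ (by simpa using hc), if_neg hc,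
      PySem.Dict.keys_modify,
      PySem.Dict.keys_insert_of_contains _ _ (PySem.Dict.contains_insert_self d team _),
      PySem.Dict.keys_insert_of_not_contains _ _ (by simpa using hc)]

-- a single pvUpdate advances the group-by invariant by one pvTally step
theorem upd_inv (d : PySem.Dict String (List Int)) (ts : List String)
    (r : String → Int × Int × Int × Int × Int)
    (hk : d.keys = ts)
    (hr : ∀ t, d.getD t [] = if ts.contains t then toRow (r t) else [])
    (h0 : ∀ t, ts.contains t = false → r t = (0, 0, 0, 0, 0))
    (team : String) (f g : Int) :
    (pvUpdate d team f g).keys = (if ts.contains team then ts else ts ++ [team]) ∧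
    (∀ t, (pvUpdate d team f g).getD t []
        = if (if ts.contains team then ts else ts ++ [team]).contains t
          then toRow (pvTally t (r t) team f g) else []) ∧
    (∀ t, (if ts.contains team then ts else ts ++ [team]).contains t = false →
        pvTally t (r t) team f g = (0, 0, 0, 0, 0)) := by
  have hct : ∀ x, d.contains x = ts.contains x := by
    intro x
    rw [PySem.Dict.contains_eq_decide_mem_keys, hk]
    simp
  have hbase : (if d.contains team then d.getD team [] else [0, 0, 0, 0, 0, 0])
      = toRow (r team) := by
    by_cases hx : ts.contains team = true
    · rw [if_pos (by rw [hct]; exact hx), hr team, if_pos hx]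
    · rw [if_neg (by rw [hct]; simpa using hx), h0 team (by simpa using hx)]
      simp [toRow]
  refine ⟨?_, ?_, ?_⟩
  · rw [pvUpdate_keys, hct, hk]
  · intro t
    rw [pvUpdate_getD, hbase]
    by_cases ht : t = team
    · subst ht
      rw [if_pos rfl, pvUpdRow_toRow t f g (r t),
        if_pos (by split_ifs with h1
                   · exact h1
                   · simp)]
    · rw [if_neg ht, hr t, pvTally_of_ne t (r t) team f g (Ne.symm ht)]
      congr 1
      split_ifs with h1 <;> simp [ht]
  · intro t hmem
    have h1 : ts.contains t = false := by
      split_ifs at hmem with h2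
      · exact hmem
      · rw [List.contains_append] at hmem
        simpa using Bool.or_eq_false_iff.mp hmem |>.left
    have h2 : t ≠ team := by
      intro he; subst he
      split_ifs at hmem with h2
      · simp at hmem h2; exact hmem h2
      · rw [List.contains_append] at hmem
        have := Bool.or_eq_false_iff.mp hmem |>.right
        simp at this
    rw [pvTally_of_ne t (r t) team f g (Ne.symm h2), h0 t h1]

-- the main group-by invariant over the whole fold
theorem fold_inv (p : List (String × String × Int × Int))
    (d : PySem.Dict String (List Int)) (ts : List String)
    (r : String → Int × Int × Int × Int × Int)
    (hk : d.keys = ts)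
    (hr : ∀ t, d.getD t [] = if ts.contains t then toRow (r t) else [])
    (h0 : ∀ t, ts.contains t = false → r t = (0, 0, 0, 0, 0)) :
    (p.foldl aStep d).keys = p.foldl teamStep ts ∧
    (∀ t, (p.foldl aStep d).getD t []
        = if (p.foldl teamStep ts).contains t then toRow (p.foldl (tallyStep t) (r t)) else []) := by
  induction p generalizing d ts r with
  | nil => exact ⟨hk, hr⟩
  | cons m p ih =>
    simp only [List.foldl_cons]
    obtain ⟨k1, u1, u2⟩ := upd_inv d ts r hk hr h0 m.1 m.2.2.1 m.2.2.2
    obtain ⟨k2, v1, v2⟩ := upd_inv (pvUpdate d m.1 m.2.2.1 m.2.2.2) _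
      (fun t => pvTally t (r t) m.1 m.2.2.1 m.2.2.2) k1 u1 u2 m.2.1 m.2.2.2 m.2.2.1
    rw [step_eq]
    exact ih _ _ _ k2 v1 v2

-- list of teams stays Nodup
theorem teams_nodup (p : List (String × String × Int × Int)) (ts : List String)
    (h : ts.Nodup) : (p.foldl teamStep ts).Nodup := by
  induction p generalizing ts with
  | nil => exact h
  | cons m p ih =>
    refine ih _ ?_
    have step : ∀ (l : List String) (x : String), l.Nodup →
        (if l.contains x then l else l ++ [x]).Nodup := by
      intro l x hl
      split_ifs with hc
      · exact hl
      · have hx : x ∉ l := by simpa using hc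
        rw [List.nodup_append]
        refine ⟨hl, List.nodup_singleton x, ?_⟩
        intro a ha b hb
        rw [List.mem_singleton] at hb
        subst hb
        exact fun hax => hx (hax ▸ ha)
    exact step _ _ (step _ _ h)

-- ===== VERDICT (by name: the statement is the Claim_ definition above) =====
theorem all_stats_spec : Claim_equal_all_stats := by
  intro sc _
  unfold Spec_all_stats
  rw [all_stats_eq, all_stats_alt_eq]
  obtain ⟨hk, hr⟩ := fold_inv sc PySem.Dict.empty [] (fun _ => (0, 0, 0, 0, 0))
    (by simp) (by intro t; simp) (by intro t _; rfl)
  have hnd : (sc.foldl aStep PySem.Dict.empty).keys.Nodup := by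
    rw [hk]; exact teams_nodup sc [] List.nodup_nil
  rw [PySem.Dict.items_eq_map_keys _ hnd [], hk]
  apply List.map_congr_left
  intro t hmem
  rw [hr t, if_pos (by simpa using hmem)]
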